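-- pv_equiv track=rewrite | github.com/lbliii/bengal | bengal/rendering/parsers/patitas/parser.py | _parse_table_delimiter
-- ===== SOURCE A (Python) =====
-- def _parse_table_delimiter(
--     line: str, expected_cols: int
-- ) -> tuple[str | None, ...] | None:
--     """Parse table delimiter row and extract alignments.
--
--     Delimiter format: |:---|:---:|---:|
--     Returns tuple of alignments ('left', 'center', 'right', None).
--     Returns None if not a valid delimiter row.
--     """
--     line = line.strip()
--
--     # Remove leading/trailing pipes
--     if line.startswith("|"):
--         line = line[1:]
--     if line.endswith("|"):
--         line = line[:-1]
--
--     parts = line.split("|")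
--     if not parts:
--         return None
--
--     alignments: list[str | None] = []
--     for part in parts:
--         part = part.strip()
--         if not part:
--             continue
--
--         # Check for valid delimiter pattern: at least one dash
--         has_left_colon = part.startswith(":")
--         has_right_colon = part.endswith(":")
--
--         # Remove colons to check dashes
--         inner = part
--         if has_left_colon:
--             inner = inner[1:]
--         if has_right_colon:
--             inner = inner[:-1]
--
--         # Must have at least one dash
--         if not inner or not all(c == "-" for c in inner):
--             return None
--
--         # Determine alignment
--         if has_left_colon and has_right_colon:
--             alignments.append("center")
--         elif has_left_colon:
--             alignments.append("left")
--         elif has_right_colon: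
--             alignments.append("right")
--         else:
--             alignments.append(None)
--
--     # Must have at least one column
--     if not alignments:
--         return None
--
--     return tuple(alignments)
-- ===== SOURCE B (Python) =====
-- def _parse_table_delimiter(line, expected_cols):
--     """One-pass DFA over the line: cells end at '|'; no strip/trim/split passes."""
--     alignments = []
--     left = right = dashes = False
--     stage = 0  # 0 leading ws, 1 in body, 2 after trailing ws / right colon, 3 dead cell
--     for ch in line + "|":
--         if ch == "|":
--             if stage == 0:
--                 pass  # empty cell: skip
--             elif stage != 3 and dashes:
--                 if left and right:
--                     alignments.append("center")
--                 elif left: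
--                     alignments.append("left")
--                 elif right:
--                     alignments.append("right")
--                 else:
--                     alignments.append(None)
--             else:
--                 return None
--             left = right = dashes = False
--             stage = 0
--         elif stage == 3:
--             pass
--         elif ch.isspace():
--             if stage != 0:
--                 stage = 2
--         elif ch == "-":
--             if stage == 2:
--                 stage = 3
--             else:
--                 dashes = True
--                 stage = 1
--         elif ch == ":":
--             if stage == 0:
--                 left = True
--                 stage = 1
--             elif stage == 1 and dashes:
--                 right = True
--                 stage = 2
--             else:
--                 stage = 3
--         else:
--             stage = 3
--     return tuple(alignments) if alignments else None
-- ===== Notes on version B (the rewrite author's own statement) =====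
-- stated objective: alternative
-- what changed: A strips the line, trims one leading/trailing pipe, splits on '|' and re-scans each part with strip/startswith/endswith/slicing/all; B makes a single left-to-right pass over the raw line with a 4-state DFA (leading-ws / body / after-trailing-ws-or-right-colon / dead), emitting an alignment at each '|', with no stripping, trimming or splitting passes.
import Mathlib
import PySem

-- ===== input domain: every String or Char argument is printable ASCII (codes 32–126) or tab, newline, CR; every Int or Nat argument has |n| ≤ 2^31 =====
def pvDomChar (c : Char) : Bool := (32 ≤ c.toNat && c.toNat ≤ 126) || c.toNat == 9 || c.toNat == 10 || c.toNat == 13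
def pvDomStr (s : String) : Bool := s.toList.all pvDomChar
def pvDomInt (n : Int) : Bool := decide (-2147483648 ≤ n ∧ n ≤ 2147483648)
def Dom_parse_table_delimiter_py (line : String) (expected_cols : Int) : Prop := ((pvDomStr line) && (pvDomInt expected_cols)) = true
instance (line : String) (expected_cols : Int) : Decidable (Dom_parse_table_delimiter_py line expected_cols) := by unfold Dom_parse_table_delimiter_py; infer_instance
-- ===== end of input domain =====

-- B replaces A's strip/trim/split-then-rescan pipeline by a single one-pass 4-state DFA over the line (alternative algorithm, same O(n) cost).


-- ===== PORT A =====
-- the for-loop over `parts` (early `return None` = `none`)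
def pvA_loop : List (List Char) → List (Option String) → Option (List (Option String))
  | [], alignments => some alignments
  | part0 :: rest, alignments =>
    let part := PySem.Chars.strip part0
    if part.isEmpty then pvA_loop rest alignments
    else
      let hl := PySem.Chars.startswith part [':']
      let hr := PySem.Chars.endswith part [':']
      let inner1 := if hl then PySem.Chars.slice part (some 1) none else part
      let inner2 := if hr then PySem.Chars.slice inner1 none (some (-1)) else inner1
      if inner2.isEmpty || !(inner2.all (fun c => c == '-')) then none
      else if hl && hr then pvA_loop rest (alignments ++ [some "center"])
      else if hl then pvA_loop rest (alignments ++ [some "left"])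
      else if hr then pvA_loop rest (alignments ++ [some "right"])
      else pvA_loop rest (alignments ++ [none])

def parse_table_delimiter_py (line : String) (expected_cols : Int) : Option (List (Option String)) :=
  let l0 := PySem.Chars.strip line.toList
  let l1 := if PySem.Chars.startswith l0 ['|'] then PySem.Chars.slice l0 (some 1) none else l0
  let l2 := if PySem.Chars.endswith l1 ['|'] then PySem.Chars.slice l1 none (some (-1)) else l1
  let parts := PySem.Chars.splitOn l2 ['|']
  if parts.isEmpty then none
  else
    match pvA_loop parts [] with
    | none => none
    | some alignments => if alignments.isEmpty then none else some alignments

-- ===== PORT B =====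
-- the one-pass DFA of Source B over `line + "|"`: state = (left, dashes, right, stage)
def pvB_loop : List Char → List (Option String) → Bool → Bool → Bool → Nat → Option (List (Option String))
  | [], alignments, _, _, _, _ => some alignments
  | c :: cs, alignments, l, d, r, st =>
    if c = '|' then
      if st = 0 then pvB_loop cs alignments false false false 0
      else if st ≠ 3 ∧ d = true then
        pvB_loop cs (alignments ++ [if l = true ∧ r = true then some "center"
          else if l = true then some "left"
          else if r = true then some "right" else none]) false false false 0
      else none
    else if st = 3 then pvB_loop cs alignments l d r st
    else if PySem.Chars.isspace c = true then
      pvB_loop cs alignments l d r (if st ≠ 0 then 2 else st)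
    else if c = '-' then
      if st = 2 then pvB_loop cs alignments l d r 3
      else pvB_loop cs alignments l true r 1
    else if c = ':' then
      if st = 0 then pvB_loop cs alignments true d r 1
      else if st = 1 ∧ d = true then pvB_loop cs alignments l d true 2
      else pvB_loop cs alignments l d r 3
    else pvB_loop cs alignments l d r 3

def parse_table_delimiter_py_alt (line : String) (expected_cols : Int) : Option (List (Option String)) :=
  match pvB_loop (line.toList ++ ['|']) [] false false false 0 with
  | none => none
  | some alignments => if alignments.isEmpty then none else some alignments

-- ===== PRECONDITION & SPEC =====
def Spec_parse_table_delimiter_py (line : String) (expected_cols : Int) (out : Option (List (Option String))) : Prop := out = parse_table_delimiter_py_alt line expected_cols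
instance (line : String) (expected_cols : Int) (out : Option (List (Option String))) : Decidable (Spec_parse_table_delimiter_py line expected_cols out) := by unfold Spec_parse_table_delimiter_py; infer_instance

-- ===== CLAIM (what is proved, stated in full; the proofs are below) =====
def Claim_equal_parse_table_delimiter_py : Prop := ∀ (line : String) (expected_cols : Int), Dom_parse_table_delimiter_py line expected_cols → Spec_parse_table_delimiter_py line expected_cols (parse_table_delimiter_py line expected_cols)

-- ===== LEMMAS AND PROOFS =====

-- ---- proof-side helper definitions ----
def wsOK (w : List Char) : Prop := ∀ c ∈ w, PySem.Chars.isspace c = true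

def optC (b : Bool) : List Char := if b then [':'] else []

-- a syntactically valid (stripped, nonempty) delimiter cell
def goodCell (t : List Char) : Prop :=
  ∃ (l : Bool) (k : Nat) (r : Bool), t = optC l ++ List.replicate (k + 1) '-' ++ optC r

-- no extension of u is a valid cell
def NoGood (u : List Char) : Prop := ∀ m, ¬ goodCell (u ++ m)

-- splitting on a single '|' (proof-side model of s.split("|"))
def pipeSplit : List Char → List (List Char)
  | [] => [[]]
  | c :: t => if c = '|' then [] :: pipeSplit t else (pipeSplit t).modifyHead (fun x => c :: x)

-- B's alignment value
def finB (l r : Bool) : Option String :=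
  if l = true ∧ r = true then some "center"
  else if l = true then some "left"
  else if r = true then some "right" else none

-- A's per-part body, with the continuation abstracted
def partA (part0 : List Char) (CONT : List (Option String) → Option (List (Option String)))
    (alignments : List (Option String)) : Option (List (Option String)) :=
  let part := PySem.Chars.strip part0
  if part.isEmpty then CONT alignments
  else
    let hl := PySem.Chars.startswith part [':']
    let hr := PySem.Chars.endswith part [':']
    let inner1 := if hl then PySem.Chars.slice part (some 1) none else part
    let inner2 := if hr then PySem.Chars.slice inner1 none (some (-1)) else inner1
    if inner2.isEmpty || !(inner2.all (fun c => c == '-')) then none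
    else if hl && hr then CONT (alignments ++ [some "center"])
    else if hl then CONT (alignments ++ [some "left"])
    else if hr then CONT (alignments ++ [some "right"])
    else CONT (alignments ++ [none])

-- DFA state invariant: what the state says about the consumed prefix p of the current cell
def StInv (p : List Char) (l d r : Bool) (st : Nat) : Prop :=
  if st = 0 then l = false ∧ d = false ∧ r = false ∧ PySem.Chars.lstrip p = []
  else if st = 1 then r = false ∧ ∃ k, PySem.Chars.lstrip p = optC l ++ List.replicate k '-'
    ∧ d = decide (k ≠ 0) ∧ (l = true ∨ k ≠ 0)
  else if st = 2 then ∃ k w, PySem.Chars.lstrip p = optC l ++ List.replicate k '-' ++ optC r ++ w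
    ∧ wsOK w ∧ d = decide (k ≠ 0) ∧ (r = true → k ≠ 0) ∧ (r = false → w ≠ []) ∧ (l = true ∨ k ≠ 0)
  else if st = 3 then ∃ u c, (u ++ [c]) <+: PySem.Chars.lstrip p
    ∧ PySem.Chars.isspace c = false ∧ NoGood (u ++ [c])
  else False

lemma stInv0 (p : List Char) (l d r : Bool) : StInv p l d r 0
    = (l = false ∧ d = false ∧ r = false ∧ PySem.Chars.lstrip p = []) := rfl

lemma stInv1 (p : List Char) (l d r : Bool) : StInv p l d r 1
    = (r = false ∧ ∃ k, PySem.Chars.lstrip p = optC l ++ List.replicate k '-'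
        ∧ d = decide (k ≠ 0) ∧ (l = true ∨ k ≠ 0)) := rfl

lemma stInv2 (p : List Char) (l d r : Bool) : StInv p l d r 2
    = (∃ k w, PySem.Chars.lstrip p = optC l ++ List.replicate k '-' ++ optC r ++ w
        ∧ wsOK w ∧ d = decide (k ≠ 0) ∧ (r = true → k ≠ 0) ∧ (r = false → w ≠ [])
        ∧ (l = true ∨ k ≠ 0)) := rfl

lemma stInv3 (p : List Char) (l d r : Bool) : StInv p l d r 3
    = (∃ u c, (u ++ [c]) <+: PySem.Chars.lstrip p
        ∧ PySem.Chars.isspace c = false ∧ NoGood (u ++ [c])) := rfl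

-- ---- generic list/strip facts ----
lemma modifyHead_comp {α : Type} (f g : α → α) (xs : List α) :
    (xs.modifyHead g).modifyHead f = xs.modifyHead (fun x => f (g x)) := by
  cases xs <;> simp

lemma modifyHead_id' {α : Type} (xs : List α) : xs.modifyHead (fun x => x) = xs := by
  cases xs <;> simp

lemma ws_ne (c : Char) (h : PySem.Chars.isspace c = true) :
    c ≠ '|' ∧ c ≠ '-' ∧ c ≠ ':' := by
  refine ⟨?_, ?_, ?_⟩ <;> rintro rfl <;> simp [PySem.Chars.isspace] at h

lemma lstrip_nil_append (p q : List Char) (h : PySem.Chars.lstrip p = []) :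
    PySem.Chars.lstrip (p ++ q) = PySem.Chars.lstrip q := by
  simp only [PySem.Chars.lstrip] at h ⊢
  rw [List.dropWhile_append, h]
  simp

lemma lstrip_append_of_ne (p q : List Char) (h : PySem.Chars.lstrip p ≠ []) :
    PySem.Chars.lstrip (p ++ q) = PySem.Chars.lstrip p ++ q := by
  simp only [PySem.Chars.lstrip] at h ⊢
  rw [List.dropWhile_append]
  simp [List.isEmpty_iff, h]

lemma lstrip_snoc (p : List Char) (c : Char) (h : PySem.Chars.isspace c = false) :
    PySem.Chars.lstrip (p ++ [c]) = PySem.Chars.lstrip p ++ [c] := by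
  by_cases hp : PySem.Chars.lstrip p = []
  · rw [lstrip_nil_append p [c] hp, hp]
    simp [PySem.Chars.lstrip, List.dropWhile, h]
  · exact lstrip_append_of_ne p [c] hp

lemma rstrip_append_ws (x w : List Char) (hw : wsOK w) :
    PySem.Chars.rstrip (x ++ w) = PySem.Chars.rstrip x := by
  simp only [PySem.Chars.rstrip, List.reverse_append]
  congr 1
  rw [List.dropWhile_append]
  have : List.dropWhile PySem.Chars.isspace w.reverse = [] := by
    rw [List.dropWhile_eq_nil_iff]
    intro c hc; exact hw c (by simpa using hc)
  simp [this]

lemma rstrip_snoc_of_not_ws (y : List Char) (c : Char) (h : PySem.Chars.isspace c = false) :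
    PySem.Chars.rstrip (y ++ [c]) = y ++ [c] := by
  simp [PySem.Chars.rstrip, List.dropWhile, h]

lemma prefix_rstrip (y : List Char) (c : Char) (x : List Char)
    (hpre : (y ++ [c]) <+: x) (h : PySem.Chars.isspace c = false) :
    (y ++ [c]) <+: PySem.Chars.rstrip x := by
  obtain ⟨m, hx⟩ := hpre
  subst hx
  have hrev : ((y ++ [c]) ++ m).reverse = m.reverse ++ (c :: y.reverse) := by simp
  simp only [PySem.Chars.rstrip]
  rw [hrev, List.dropWhile_append]
  by_cases hm : (List.dropWhile PySem.Chars.isspace m.reverse).isEmpty = true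
  · rw [if_pos hm, List.dropWhile_cons_of_neg (by simp [h])]
    simp
  · rw [if_neg hm]
    refine ⟨(List.dropWhile PySem.Chars.isspace m.reverse).reverse, ?_⟩
    simp

lemma rstrip_key (z : List Char) :
    z = PySem.Chars.rstrip z ++ (List.takeWhile PySem.Chars.isspace z.reverse).reverse := by
  conv_lhs => rw [← List.reverse_reverse z,
    ← List.takeWhile_append_dropWhile (p := PySem.Chars.isspace) (l := z.reverse)]
  rw [List.reverse_append]
  simp [PySem.Chars.rstrip]

lemma strip_decomp (x : List Char) :
    ∃ a b, wsOK a ∧ wsOK b ∧ x = a ++ PySem.Chars.strip x ++ b := by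
  refine ⟨List.takeWhile PySem.Chars.isspace x,
    (List.takeWhile PySem.Chars.isspace (PySem.Chars.lstrip x).reverse).reverse, ?_, ?_, ?_⟩
  · intro c hc; exact List.mem_takeWhile_imp hc
  · intro c hc; exact List.mem_takeWhile_imp (by simpa using hc)
  · conv_lhs => rw [← List.takeWhile_append_dropWhile (p := PySem.Chars.isspace) (l := x)]
    rw [List.append_assoc]
    congr 1
    show PySem.Chars.lstrip x = _
    exact rstrip_key (PySem.Chars.lstrip x)

-- ---- goodCell facts ----
lemma good_chars (t : List Char) (h : goodCell t) (c : Char) (hc : c ∈ t) :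
    c = '-' ∨ c = ':' := by
  obtain ⟨l, k, r, rfl⟩ := h
  simp only [List.mem_append, List.mem_replicate] at hc
  rcases hc with (hc | hc) | hc
  · right; cases l <;> simp [optC] at hc <;> simp [hc]
  · left; exact hc.2
  · right; cases r <;> simp [optC] at hc <;> simp [hc]

lemma good_dash_mem (t : List Char) (h : goodCell t) : '-' ∈ t := by
  obtain ⟨l, k, r, rfl⟩ := h
  simp [List.mem_replicate]

lemma ng_badchar (u : List Char) (c : Char) (h : c ∈ u) (h2 : ¬(c = '-' ∨ c = ':')) :
    NoGood u := by
  intro m hg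
  exact h2 (good_chars _ hg c (by simp [h]))

lemma good_colon_pos (t : List Char) (h : goodCell t) (i : Nat) (hi : i < t.length)
    (hc : t[i] = ':') : i = 0 ∨ i = t.length - 1 := by
  obtain ⟨l, k, r, rfl⟩ := h
  by_contra hcon
  push_neg at hcon
  obtain ⟨h0, hL⟩ := hcon
  have ha : (optC l).length ≤ 1 := by cases l <;> simp [optC]
  have hb : (optC r).length ≤ 1 := by cases r <;> simp [optC]
  have hlen : (optC l ++ List.replicate (k+1) '-' ++ optC r).length
      = (optC l).length + (k+1) + (optC r).length := by simp; omega
  have hge : (optC l).length ≤ i := by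
    by_contra hlt
    push_neg at hlt
    exact h0 (by omega)
  have hlt : i < (optC l).length + (k+1) := by
    by_contra hge2
    push_neg at hge2
    apply hL
    omega
  have hi' : i < (optC l ++ (List.replicate (k+1) '-' ++ optC r)).length := by
    simpa [List.append_assoc] using hi
  have hmid : (optC l ++ (List.replicate (k+1) '-' ++ optC r))[i]'hi' = '-' := by
    rw [List.getElem_append_right hge]
    rw [List.getElem_append_left (by simp; omega)]
    simp
  simp only [List.append_assoc] at hc
  rw [hmid] at hc
  exact absurd hc (by decide)

lemma ng_mid (x y : List Char) (hx : x ≠ []) (hy : y ≠ []) : NoGood (x ++ ':' :: y) := by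
  intro m hg
  have hg' : goodCell (x ++ ':' :: (y ++ m)) := by simpa [List.append_assoc] using hg
  have hi : x.length < (x ++ ':' :: (y ++ m)).length := by simp
  have hc : (x ++ ':' :: (y ++ m))[x.length]'hi = ':' := by
    rw [List.getElem_append_right (Nat.le_refl _)]
    simp
  rcases good_colon_pos _ hg' _ hi hc with h0 | hL
  · exact hx (List.eq_nil_of_length_eq_zero h0)
  · have h1 : (x ++ ':' :: (y ++ m)).length = x.length + ((y ++ m).length + 1) := by
      simp
    have h2 : 0 < y.length := List.length_pos_of_ne_nil hy
    have h3 : (y ++ m).length = y.length + m.length := by simp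
    omega

lemma ng_cc (u0 : List Char) : NoGood (':' :: ':' :: u0) := by
  intro m hg
  obtain ⟨l, k, r, he⟩ := hg
  cases l
  · simp only [optC, Bool.false_eq_true, if_false, List.nil_append] at he
    rw [List.replicate_succ] at he
    simp at he
  · simp only [optC, if_true] at he
    rw [List.replicate_succ] at he
    simp at he

-- ---- all-dashes = replicate ----
lemma all_dash_replicate (xs : List Char) (h1 : xs ≠ []) (h2 : xs.all (fun c => c == '-') = true) :
    ∃ n, xs = List.replicate (n + 1) '-' := by
  have : xs = List.replicate xs.length '-' := by
    apply List.eq_replicate_of_mem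
    intro c hc
    have := List.all_eq_true.mp h2 c hc
    simpa using this
  obtain ⟨n, hn⟩ : ∃ n, xs.length = n + 1 := by
    cases xs with
    | nil => exact absurd rfl h1
    | cons a t => exact ⟨t.length, rfl⟩
  exact ⟨n, by rw [this, hn]⟩

-- ---- partA evaluation lemmas ----
lemma pvA_cons (part0 : List Char) (rest : List (List Char)) (acc : List (Option String)) :
    pvA_loop (part0 :: rest) acc = partA part0 (pvA_loop rest) acc := rfl

lemma partA_skip (p : List Char) (CONT : List (Option String) → Option (List (Option String)))
    (acc : List (Option String)) (h : PySem.Chars.strip p = []) :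
    partA p CONT acc = CONT acc := by
  simp [partA, h]

lemma slice_drop_one (xs : List Char) : PySem.Chars.slice xs (some 1) none = xs.drop 1 := by
  have := PySem.List.slice_from xs (a := 1) (by omega)
  simpa using this

lemma slice_dropLast (xs : List Char) : PySem.Chars.slice xs none (some (-1)) = xs.dropLast := by
  have h := PySem.Str.slice_to_neg_one (String.ofList xs)
  simpa using h

lemma slice_drop_one' (xs : List Char) : PySem.List.slice xs (some 1) none = xs.drop 1 := by
  have h := slice_drop_one xs
  simpa using h

lemma slice_dropLast' (xs : List Char) : PySem.List.slice xs none (some (-1)) = xs.dropLast := by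
  have h := slice_dropLast xs
  simpa using h

lemma endswith_colon_concat (y : List Char) : PySem.Chars.endswith (y ++ [':']) [':'] = true :=
  (PySem.Chars.endswith_iff _ _).mpr ⟨y, rfl⟩

lemma endswith_colon_dash (y : List Char) : PySem.Chars.endswith (y ++ ['-']) [':'] = false := by
  rw [Bool.eq_false_iff]
  intro htr
  obtain ⟨t, ht⟩ := (PySem.Chars.endswith_iff _ _).mp htr
  have h1 := congrArg List.getLast? ht
  simp at h1

lemma startswith_colon_cons (x : List Char) : PySem.Chars.startswith (':' :: x) [':'] = true := by
  simp [PySem.Chars.startswith, List.isPrefixOf]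

lemma startswith_colon_dash (x : List Char) : PySem.Chars.startswith ('-' :: x) [':'] = false := by
  simp [PySem.Chars.startswith, List.isPrefixOf]

lemma partA_good (p : List Char) (CONT : List (Option String) → Option (List (Option String)))
    (acc : List (Option String)) (l : Bool) (k : Nat) (r : Bool)
    (h : PySem.Chars.strip p = optC l ++ List.replicate (k + 1) '-' ++ optC r) :
    partA p CONT acc = CONT (acc ++ [finB l r]) := by
  cases l <;> cases r
  · -- l = false, r = false
    have h' : PySem.Chars.strip p = List.replicate (k + 1) '-' := by simpa [optC] using h
    have hsw : PySem.Chars.startswith (List.replicate (k + 1) '-') [':'] = false := by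
      rw [List.replicate_succ]; exact startswith_colon_dash _
    have hew : PySem.Chars.endswith (List.replicate (k + 1) '-') [':'] = false := by
      rw [List.replicate_succ']; exact endswith_colon_dash _
    simp [partA, h', hsw, hew, finB, List.isEmpty_iff, List.all_eq_true, List.mem_replicate]
  · -- l = false, r = true
    have h' : PySem.Chars.strip p = List.replicate (k + 1) '-' ++ [':'] := by simpa [optC] using h
    have hsw : PySem.Chars.startswith (List.replicate (k + 1) '-' ++ [':']) [':'] = false := by
      rw [List.replicate_succ, List.cons_append]; exact startswith_colon_dash _
    have hew : PySem.Chars.endswith (List.replicate (k + 1) '-' ++ [':']) [':'] = true :=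
      endswith_colon_concat _
    simp [partA, h', hsw, hew, finB, slice_dropLast, slice_dropLast', List.dropLast_concat,
      List.isEmpty_iff, List.all_eq_true, List.mem_replicate]
  · -- l = true, r = false
    have h' : PySem.Chars.strip p = ':' :: List.replicate (k + 1) '-' := by simpa [optC] using h
    have hsw : PySem.Chars.startswith (':' :: List.replicate (k + 1) '-') [':'] = true :=
      startswith_colon_cons _
    have hew : PySem.Chars.endswith (':' :: List.replicate (k + 1) '-') [':'] = false := by
      rw [show (':' :: List.replicate (k + 1) '-' : List Char)
          = (':' :: List.replicate k '-') ++ ['-'] by rw [List.replicate_succ']; rfl]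
      exact endswith_colon_dash _
    simp [partA, h', hsw, hew, finB, slice_drop_one, slice_drop_one',
      List.isEmpty_iff, List.all_eq_true, List.mem_replicate]
  · -- l = true, r = true
    have h' : PySem.Chars.strip p = ':' :: (List.replicate (k + 1) '-' ++ [':']) := by
      simpa [optC] using h
    have hsw : PySem.Chars.startswith (':' :: (List.replicate (k + 1) '-' ++ [':'])) [':'] = true :=
      startswith_colon_cons _
    have hew : PySem.Chars.endswith (':' :: (List.replicate (k + 1) '-' ++ [':'])) [':'] = true := by
      rw [show (':' :: (List.replicate (k + 1) '-' ++ [':']) : List Char)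
          = (':' :: List.replicate (k + 1) '-') ++ [':'] by rfl]
      exact endswith_colon_concat _
    simp [partA, h', hsw, hew, finB, slice_drop_one, slice_drop_one', slice_dropLast, slice_dropLast', List.dropLast_concat,
      List.isEmpty_iff, List.all_eq_true, List.mem_replicate]

lemma partA_bad (p : List Char) (CONT : List (Option String) → Option (List (Option String)))
    (acc : List (Option String)) (h1 : PySem.Chars.strip p ≠ [])
    (h2 : ¬ goodCell (PySem.Chars.strip p)) :
    partA p CONT acc = none := by
  simp only [partA, slice_drop_one, slice_dropLast]
  rw [if_neg (by simp [List.isEmpty_iff, h1])]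
  by_cases hP : ((if PySem.Chars.endswith (PySem.Chars.strip p) [':'] then
      (if PySem.Chars.startswith (PySem.Chars.strip p) [':'] then (PySem.Chars.strip p).drop 1
        else PySem.Chars.strip p).dropLast
      else (if PySem.Chars.startswith (PySem.Chars.strip p) [':'] then (PySem.Chars.strip p).drop 1
        else PySem.Chars.strip p)).isEmpty
      || !((if PySem.Chars.endswith (PySem.Chars.strip p) [':'] then
      (if PySem.Chars.startswith (PySem.Chars.strip p) [':'] then (PySem.Chars.strip p).drop 1
        else PySem.Chars.strip p).dropLast
      else (if PySem.Chars.startswith (PySem.Chars.strip p) [':'] then (PySem.Chars.strip p).drop 1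
        else PySem.Chars.strip p)).all (fun c => c == '-'))) = true
  · rw [if_pos hP]
  · exfalso
    apply h2
    rw [Bool.not_eq_true, Bool.or_eq_false_iff] at hP
    obtain ⟨hemp, hall⟩ := hP
    rw [Bool.not_eq_false'] at hall
    by_cases hsw : PySem.Chars.startswith (PySem.Chars.strip p) [':'] = true
    · obtain ⟨t1, ht1⟩ : ∃ t1, PySem.Chars.strip p = ':' :: t1 := by
        obtain ⟨m, hm⟩ := (PySem.Chars.startswith_iff _ _).mp hsw
        exact ⟨m, hm.symm⟩
      by_cases hsr : PySem.Chars.endswith (PySem.Chars.strip p) [':'] = true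
      · obtain ⟨t2, ht2⟩ := (PySem.Chars.endswith_iff _ _).mp hsr
        simp only [hsw, hsr, eq_self_iff_true, Bool.false_eq_true, if_true, if_false] at hemp hall
        obtain ⟨n, hn⟩ := all_dash_replicate _ (by simpa [List.isEmpty_iff] using hemp) hall
        rw [ht1] at hn
        simp only [List.drop_one, List.tail_cons] at hn
        have ht2' : t2 ++ [':'] = ':' :: t1 := by rw [← ht1]; exact ht2
        cases t2 with
        | nil =>
          have ht1nil : t1 = [] := by simpa using ht2'.symm
          rw [ht1nil] at hn
          simp at hn
        | cons c0 t2' =>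
          have ht1' : t1 = t2' ++ [':'] := by
            have hx : c0 = ':' ∧ t2' ++ [':'] = t1 := by simpa using ht2'
            exact hx.2.symm
          rw [ht1', List.dropLast_concat] at hn
          refine ⟨true, n, true, ?_⟩
          rw [ht1, ht1', hn]
          simp [optC]
      · simp only [hsw, hsr, eq_self_iff_true, Bool.false_eq_true, if_true, if_false] at hemp hall
        obtain ⟨n, hn⟩ := all_dash_replicate _ (by simpa [List.isEmpty_iff] using hemp) hall
        rw [ht1] at hn
        simp only [List.drop_one, List.tail_cons] at hn
        refine ⟨true, n, false, ?_⟩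
        rw [ht1, hn]
        simp [optC]
    · by_cases hsr : PySem.Chars.endswith (PySem.Chars.strip p) [':'] = true
      · obtain ⟨t2, ht2⟩ := (PySem.Chars.endswith_iff _ _).mp hsr
        simp only [hsw, hsr, eq_self_iff_true, Bool.false_eq_true, if_true, if_false] at hemp hall
        obtain ⟨n, hn⟩ := all_dash_replicate _ (by simpa [List.isEmpty_iff] using hemp) hall
        rw [← ht2, List.dropLast_concat] at hn
        refine ⟨false, n, true, ?_⟩
        rw [← ht2, hn]
        simp [optC]
      · simp only [hsw, hsr, eq_self_iff_true, Bool.false_eq_true, if_true, if_false] at hemp hall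
        obtain ⟨n, hn⟩ := all_dash_replicate _ (by simpa [List.isEmpty_iff] using hemp) hall
        refine ⟨false, n, false, ?_⟩
        rw [hn]
        simp [optC]
-- ---- splitOn bridge ----
lemma splitOn_go_pipe (fuel : Nat) : ∀ (s cur : List Char) (acc : List (List Char)),
    s.length < fuel →
    PySem.Chars.splitOn.go ['|'] fuel s cur acc
      = acc.reverse ++ (pipeSplit s).modifyHead (fun x => cur.reverse ++ x) := by
  induction fuel with
  | zero => intro s cur acc h; omega
  | succ n ih =>
    intro s cur acc h
    cases s with
    | nil => simp [PySem.Chars.splitOn.go, pipeSplit]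
    | cons c rest =>
      by_cases hc : c = '|'
      · subst hc
        rw [show PySem.Chars.splitOn.go ['|'] (n+1) ('|' :: rest) cur acc
            = PySem.Chars.splitOn.go ['|'] n (List.drop 1 ('|' :: rest)) [] (cur.reverse :: acc) by
          simp [PySem.Chars.splitOn.go, List.isPrefixOf]]
        rw [List.drop_one, List.tail_cons]
        rw [ih rest [] (cur.reverse :: acc) (by simp at h ⊢; omega)]
        simp [pipeSplit, modifyHead_id']
      · rw [show PySem.Chars.splitOn.go ['|'] (n+1) (c :: rest) cur acc
            = PySem.Chars.splitOn.go ['|'] n rest (c :: cur) acc by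
          simp [PySem.Chars.splitOn.go, List.isPrefixOf, Ne.symm hc]]
        rw [ih rest (c :: cur) acc (by simp at h ⊢; omega)]
        rw [show pipeSplit (c :: rest) = (pipeSplit rest).modifyHead (fun x => c :: x) by
          simp [pipeSplit, hc]]
        rw [modifyHead_comp]
        have hfun : (fun x => (c :: cur).reverse ++ x) = (fun x => cur.reverse ++ c :: x) := by
          funext x; simp
        rw [hfun]

lemma splitOn_pipe (s : List Char) : PySem.Chars.splitOn s ['|'] = pipeSplit s := by
  rw [PySem.Chars.splitOn, splitOn_go_pipe (s.length + 1) s [] [] (by omega)]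
  simp [modifyHead_id']

lemma pipeSplit_ne_nil (s : List Char) : pipeSplit s ≠ [] := by
  cases s with
  | nil => simp [pipeSplit]
  | cons c t =>
    simp only [pipeSplit]
    split
    · simp
    · intro h
      have := pipeSplit_ne_nil t
      cases pipeSplit t <;> simp_all

-- ---- B-side context propagation ----
lemma pvB_ctx (t1 t2 : List Char)
    (H : ∀ acc l d r st, pvB_loop t1 acc l d r st = pvB_loop t2 acc l d r st) :
    ∀ (cs : List Char) acc l d r st,
      pvB_loop (cs ++ t1) acc l d r st = pvB_loop (cs ++ t2) acc l d r st := by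
  intro cs
  induction cs with
  | nil => exact H
  | cons c cs ih =>
    intro acc l d r st
    simp only [List.cons_append, pvB_loop]
    split
    · split
      · exact ih _ _ _ _ _
      · split
        · exact ih _ _ _ _ _
        · rfl
    · split
      · exact ih _ _ _ _ _
      · split
        · exact ih _ _ _ _ _
        · split
          · split
            · exact ih _ _ _ _ _
            · exact ih _ _ _ _ _
          · split
            · split
              · exact ih _ _ _ _ _
              · split
                · exact ih _ _ _ _ _
                · exact ih _ _ _ _ _
            · exact ih _ _ _ _ _

lemma pvB_tailpipe : ∀ (acc : List (Option String)) l d r st,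
    pvB_loop ['|', '|'] acc l d r st = pvB_loop ['|'] acc l d r st := by
  intro acc l d r st
  by_cases h0 : st = 0
  · simp [pvB_loop, h0]
  · by_cases hd : st ≠ 3 ∧ d = true
    · simp [pvB_loop, h0, hd]
    · simp [pvB_loop, h0, hd]

lemma pvB_wspipe (w : List Char) : wsOK w → ∀ (acc : List (Option String)) l d r st,
    pvB_loop (w ++ ['|']) acc l d r st = pvB_loop ['|'] acc l d r st := by
  induction w with
  | nil => intro _ acc l d r st; rfl
  | cons c w ih =>
    intro hw acc l d r st
    have hc : PySem.Chars.isspace c = true := hw c (by simp)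
    obtain ⟨hne, _, _⟩ := ws_ne c hc
    have hw' : wsOK w := fun x hx => hw x (by simp [hx])
    by_cases h3 : st = 3
    · simp only [List.cons_append, pvB_loop, if_neg hne, if_pos h3]
      exact ih hw' acc l d r st
    · simp only [List.cons_append, pvB_loop, if_neg hne, if_neg h3, if_pos hc]
      rw [ih hw' acc l d r _]
      by_cases h0 : st = 0
      · simp [h0, pvB_loop]
      · rw [if_pos h0]
        by_cases hd : d = true <;> simp [pvB_loop, h0, h3, hd]

lemma pvB_leadws (w : List Char) : wsOK w → ∀ (cs : List Char) acc,
    pvB_loop (w ++ cs) acc false false false 0 = pvB_loop cs acc false false false 0 := by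
  induction w with
  | nil => intro _ cs acc; rfl
  | cons c w ih =>
    intro hw cs acc
    have hc : PySem.Chars.isspace c = true := hw c (by simp)
    obtain ⟨hne, _, _⟩ := ws_ne c hc
    simp only [List.cons_append, pvB_loop, if_neg hne, if_pos hc]
    rw [if_neg (by simp)]
    exact ih (fun x hx => hw x (by simp [hx])) cs acc

-- ---- invariant: initialization, preservation, finish ----
lemma shape_ne_nil (l : Bool) (k : Nat) (rest : List Char) (hlk : l = true ∨ k ≠ 0) :
    optC l ++ List.replicate k '-' ++ rest ≠ [] := by
  rcases hlk with hl | hk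
  · subst hl; simp [optC]
  · cases l <;> simp [optC, hk]

lemma inv_nil : StInv [] false false false 0 := by
  simp [StInv, PySem.Chars.lstrip]

lemma inv_ws (p : List Char) (l d r : Bool) (st : Nat) (c : Char)
    (h : StInv p l d r st) (h3 : st ≠ 3) (hc : PySem.Chars.isspace c = true) :
    StInv (p ++ [c]) l d r (if st ≠ 0 then 2 else st) := by
  by_cases h0 : st = 0
  · subst h0
    rw [if_neg (by simp)]
    rw [stInv0] at h ⊢
    obtain ⟨hl, hd, hr, hp⟩ := h
    refine ⟨hl, hd, hr, ?_⟩
    rw [lstrip_nil_append p [c] hp]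
    simp [PySem.Chars.lstrip, List.dropWhile, hc]
  · rw [if_pos h0]
    by_cases h1 : st = 1
    · subst h1
      rw [stInv1] at h
      obtain ⟨hr, k, hp, hd, hlk⟩ := h
      subst hr
      have hne : PySem.Chars.lstrip p ≠ [] := by
        rw [hp]
        exact (by simpa using shape_ne_nil l k [] hlk)
      rw [stInv2]
      refine ⟨k, [c], ?_, ?_, hd, by simp, by simp, hlk⟩
      · rw [lstrip_append_of_ne p [c] hne, hp]
        simp [optC]
      · intro x hx; simp at hx; subst hx; exact hc
    · by_cases h2 : st = 2
      · subst h2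
        rw [stInv2] at h ⊢
        obtain ⟨k, w, hp, hw, hd, hrk, hrw, hlk⟩ := h
        have hne : PySem.Chars.lstrip p ≠ [] := by
          rw [hp]
          simpa [List.append_assoc] using
            shape_ne_nil l k (optC r ++ w) (by simpa using hlk)
        refine ⟨k, w ++ [c], ?_, ?_, hd, hrk, by simp, hlk⟩
        · rw [lstrip_append_of_ne p [c] hne, hp]
          simp
        · intro x hx
          rcases List.mem_append.mp hx with hx | hx
          · exact hw x hx
          · simp at hx; subst hx; exact hc
      · exfalso
        simp only [StInv, if_neg h0, if_neg h1, if_neg h2, if_neg h3] at h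

lemma inv_st3 (p : List Char) (l d r : Bool) (c : Char) (h : StInv p l d r 3) :
    StInv (p ++ [c]) l d r 3 := by
  rw [stInv3] at h ⊢
  obtain ⟨u, c', hpre, hcws, hng⟩ := h
  have hne : PySem.Chars.lstrip p ≠ [] := by
    intro hemp
    rw [hemp] at hpre
    simpa using List.prefix_nil.mp hpre
  refine ⟨u, c', ?_, hcws, hng⟩
  rw [lstrip_append_of_ne p [c] hne]
  exact hpre.trans (List.prefix_append _ _)

lemma inv_dash (p : List Char) (l d r : Bool) (st : Nat) (h : StInv p l d r st)
    (h3 : st ≠ 3) (h2 : st ≠ 2) : StInv (p ++ ['-']) l true r 1 := by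
  have hdws : PySem.Chars.isspace '-' = false := by decide
  by_cases h0 : st = 0
  · subst h0
    rw [stInv0] at h
    obtain ⟨hl, hd, hr, hp⟩ := h
    subst hl; subst hr
    rw [stInv1]
    refine ⟨rfl, 1, ?_, by simp, Or.inr (by omega)⟩
    rw [lstrip_snoc p '-' hdws, hp]
    simp [optC]
  · have h1 : st = 1 := by
      by_contra h1n
      simp only [StInv, if_neg h0, if_neg h1n, if_neg h2, if_neg h3] at h
    subst h1
    rw [stInv1] at h ⊢
    obtain ⟨hr, k, hp, hd, hlk⟩ := h
    refine ⟨hr, k + 1, ?_, by simp, Or.inr (by omega)⟩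
    rw [lstrip_snoc p '-' hdws, hp, List.replicate_succ']
    simp [List.append_assoc]

lemma inv_dash2 (p : List Char) (l d r : Bool) (h : StInv p l d r 2) :
    StInv (p ++ ['-']) l d r 3 := by
  have hdws : PySem.Chars.isspace '-' = false := by decide
  rw [stInv2] at h
  rw [stInv3]
  obtain ⟨k, w, hp, hw, hd, hrk, hrw, hlk⟩ := h
  refine ⟨PySem.Chars.lstrip p, '-', ?_, hdws, ?_⟩
  · rw [lstrip_snoc p '-' hdws]
  · by_cases hr : r = true
    · have hk := hrk hr
      subst hr
      by_cases hww : w = []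
      · subst hww
        rw [show PySem.Chars.lstrip p ++ ['-']
            = (optC l ++ List.replicate k '-') ++ ':' :: ['-'] from by rw [hp]; simp [optC]]
        exact ng_mid _ _ (by simpa using shape_ne_nil l k [] (Or.inr hk)) (by simp)
      · obtain ⟨c0, hc0⟩ := List.exists_mem_of_ne_nil w hww
        apply ng_badchar _ c0
        · rw [hp]; simp [hc0]
        · obtain ⟨_, hx2, hx3⟩ := ws_ne c0 (hw c0 hc0)
          rintro (h | h)
          · exact hx2 h
          · exact hx3 h
    · have hwne := hrw (by simpa using hr)
      obtain ⟨c0, hc0⟩ := List.exists_mem_of_ne_nil w hwne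
      apply ng_badchar _ c0
      · rw [hp]; simp [hc0]
      · obtain ⟨_, hx2, hx3⟩ := ws_ne c0 (hw c0 hc0)
        rintro (h | h)
        · exact hx2 h
        · exact hx3 h

lemma inv_colon0 (p : List Char) (l d r : Bool) (h : StInv p l d r 0) :
    StInv (p ++ [':']) true d r 1 := by
  rw [stInv0] at h
  obtain ⟨hl, hd, hr, hp⟩ := h
  subst hd; subst hr
  rw [stInv1]
  refine ⟨rfl, 0, ?_, by simp, Or.inl rfl⟩
  rw [lstrip_snoc p ':' (by decide), hp]
  simp [optC]

lemma inv_colon1d (p : List Char) (l d r : Bool) (h : StInv p l d r 1) (hd : d = true) :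
    StInv (p ++ [':']) l d true 2 := by
  rw [stInv1] at h
  obtain ⟨hr, k, hp, hdk, hlk⟩ := h
  have hk : k ≠ 0 := by
    rw [hd] at hdk
    simpa using hdk.symm
  rw [stInv2]
  refine ⟨k, [], ?_, by intro x hx; simp at hx, hdk, fun _ => hk, by simp, hlk⟩
  rw [lstrip_snoc p ':' (by decide), hp]
  simp [optC]

lemma inv_colon_bad (p : List Char) (l d r : Bool) (st : Nat) (h : StInv p l d r st)
    (h3 : st ≠ 3) (h0 : st ≠ 0) (hnot : ¬ (st = 1 ∧ d = true)) :
    StInv (p ++ [':']) l d r 3 := by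
  have hcws : PySem.Chars.isspace ':' = false := by decide
  rw [stInv3]
  by_cases h1 : st = 1
  · subst h1
    have hd : d = false := by
      rcases Bool.eq_false_or_eq_true d with hx | hx
      · exact absurd ⟨rfl, hx⟩ hnot
      · exact hx
    rw [stInv1] at h
    obtain ⟨hr, k, hp, hdk, hlk⟩ := h
    have hk : k = 0 := by
      rw [hd] at hdk
      simpa using hdk.symm
    subst hk
    have hl : l = true := by
      rcases hlk with hx | hx
      · exact hx
      · omega
    subst hl
    have hp' : PySem.Chars.lstrip p = [':'] := by simpa [optC] using hp
    refine ⟨[':'], ':', ?_, hcws, ?_⟩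
    · rw [lstrip_snoc p ':' hcws, hp']
    · exact ng_cc []
  · have h2 : st = 2 := by
      by_contra h2n
      simp only [StInv, if_neg h0, if_neg h1, if_neg h2n, if_neg h3] at h
    subst h2
    rw [stInv2] at h
    obtain ⟨k, w, hp, hw, hd, hrk, hrw, hlk⟩ := h
    refine ⟨PySem.Chars.lstrip p, ':', ?_, hcws, ?_⟩
    · rw [lstrip_snoc p ':' hcws]
    · by_cases hr : r = true
      · have hk := hrk hr
        subst hr
        by_cases hww : w = []
        · subst hww
          rw [show PySem.Chars.lstrip p ++ [':']
              = (optC l ++ List.replicate k '-') ++ ':' :: [':'] from by rw [hp]; simp [optC]]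
          exact ng_mid _ _ (by simpa using shape_ne_nil l k [] (Or.inr hk)) (by simp)
        · obtain ⟨c0, hc0⟩ := List.exists_mem_of_ne_nil w hww
          apply ng_badchar _ c0
          · rw [hp]; simp [hc0]
          · obtain ⟨_, hx2, hx3⟩ := ws_ne c0 (hw c0 hc0)
            rintro (hx | hx)
            · exact hx2 hx
            · exact hx3 hx
      · have hwne := hrw (by simpa using hr)
        obtain ⟨c0, hc0⟩ := List.exists_mem_of_ne_nil w hwne
        apply ng_badchar _ c0
        · rw [hp]; simp [hc0]
        · obtain ⟨_, hx2, hx3⟩ := ws_ne c0 (hw c0 hc0)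
          rintro (hx | hx)
          · exact hx2 hx
          · exact hx3 hx

lemma inv_other (p : List Char) (l d r : Bool) (st : Nat) (c : Char) (_h : StInv p l d r st)
    (_h3 : st ≠ 3) (hws : PySem.Chars.isspace c = false) (hd : c ≠ '-') (hco : c ≠ ':') :
    StInv (p ++ [c]) l d r 3 := by
  rw [stInv3]
  refine ⟨PySem.Chars.lstrip p, c, ?_, hws, ?_⟩
  · rw [lstrip_snoc p c hws]
  · apply ng_badchar _ c (by simp)
    rintro (hx | hx)
    · exact hd hx
    · exact hco hx

lemma finish_eq (p : List Char) (l d r : Bool) (st : Nat)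
    (CONT : List (Option String) → Option (List (Option String)))
    (acc : List (Option String)) (h : StInv p l d r st) :
    (if st = 0 then CONT acc
     else if st ≠ 3 ∧ d = true then CONT (acc ++ [finB l r]) else none)
    = partA p CONT acc := by
  by_cases h0 : st = 0
  · subst h0
    rw [if_pos rfl]
    rw [stInv0] at h
    obtain ⟨hl, hdf, hrf, hp⟩ := h
    rw [partA_skip p CONT acc (by simp [PySem.Chars.strip, hp, PySem.Chars.rstrip])]
  · rw [if_neg h0]
    by_cases h1 : st = 1
    · subst h1
      rw [stInv1] at h
      obtain ⟨hr, k, hp, hd, hlk⟩ := h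
      subst hr
      have hstrip : PySem.Chars.strip p = optC l ++ List.replicate k '-' := by
        show PySem.Chars.rstrip (PySem.Chars.lstrip p) = _
        rw [hp]
        cases k with
        | zero =>
          have hl : l = true := by
            rcases hlk with hx | hx
            · exact hx
            · omega
          subst hl
          simpa [optC] using rstrip_snoc_of_not_ws [] ':' (by decide)
        | succ k0 =>
          rw [List.replicate_succ', ← List.append_assoc]
          rw [rstrip_snoc_of_not_ws _ '-' (by decide)]
      cases k with
      | zero =>
        have hl : l = true := by
          rcases hlk with hx | hx
          · exact hx
          · omega
        subst hl
        have hdf : d = false := by simpa using hd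
        subst hdf
        rw [if_neg (by simp)]
        rw [partA_bad p CONT acc (by rw [hstrip]; simp [optC])
          (by
            intro hg
            rw [hstrip] at hg
            have := good_dash_mem _ hg
            simp [optC] at this)]
      | succ k0 =>
        have hdt : d = true := by simpa using hd
        subst hdt
        rw [if_pos ⟨by omega, rfl⟩]
        rw [partA_good p CONT acc l k0 false (by simpa [optC] using hstrip)]
    · by_cases h2 : st = 2
      · subst h2
        rw [stInv2] at h
        obtain ⟨k, w, hp, hw, hd, hrk, hrw, hlk⟩ := h
        have hstrip0 : PySem.Chars.strip p
            = PySem.Chars.rstrip (optC l ++ List.replicate k '-' ++ optC r) := by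
          show PySem.Chars.rstrip (PySem.Chars.lstrip p) = _
          rw [hp]
          rw [show optC l ++ List.replicate k '-' ++ optC r ++ w
              = (optC l ++ List.replicate k '-' ++ optC r) ++ w from by simp [List.append_assoc]]
          exact rstrip_append_ws _ w hw
        cases k with
        | zero =>
          have hrf : r = false := by
            rcases Bool.eq_false_or_eq_true r with hx | hx
            · exact absurd (hrk hx) (by omega)
            · exact hx
          subst hrf
          have hl : l = true := by
            rcases hlk with hx | hx
            · exact hx
            · omega
          subst hl
          have hstrip : PySem.Chars.strip p = [':'] := by
            rw [hstrip0]
            simpa [optC] using rstrip_snoc_of_not_ws [] ':' (by decide)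
          have hdf : d = false := by simpa using hd
          subst hdf
          rw [if_neg (by simp)]
          rw [partA_bad p CONT acc (by rw [hstrip]; simp)
            (by
              intro hg
              rw [hstrip] at hg
              have := good_dash_mem _ hg
              simp at this)]
        | succ k0 =>
          have hdt : d = true := by simpa using hd
          subst hdt
          rw [if_pos ⟨by omega, rfl⟩]
          have hstrip : PySem.Chars.strip p
              = optC l ++ List.replicate (k0 + 1) '-' ++ optC r := by
            rw [hstrip0]
            cases r with
            | true =>
              rw [show optC l ++ List.replicate (k0 + 1) '-' ++ optC true
                  = (optC l ++ List.replicate (k0 + 1) '-') ++ [':'] from by simp [optC]]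
              rw [rstrip_snoc_of_not_ws _ ':' (by decide)]
            | false =>
              rw [show optC l ++ List.replicate (k0 + 1) '-' ++ optC false
                  = (optC l ++ List.replicate k0 '-') ++ ['-'] from by
                simp only [optC, Bool.false_eq_true, if_false, List.append_nil]
                rw [List.replicate_succ', ← List.append_assoc]]
              rw [rstrip_snoc_of_not_ws _ '-' (by decide)]
          rw [partA_good p CONT acc l k0 r hstrip]
      · have h3 : st = 3 := by
          by_contra hn
          simp only [StInv, if_neg h0, if_neg h1, if_neg h2, if_neg hn] at h
        subst h3
        rw [stInv3] at h
        obtain ⟨u, c, hpre, hcws, hng⟩ := h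
        rw [if_neg (by simp)]
        have hpre2 : (u ++ [c]) <+: PySem.Chars.strip p :=
          prefix_rstrip u c _ hpre hcws
        obtain ⟨m, hm⟩ := hpre2
        rw [partA_bad p CONT acc (by rw [← hm]; simp)
          (by rw [← hm]; exact hng m)]

-- ---- the core simulation ----
lemma core : ∀ (cs p : List Char) (acc : List (Option String)) (l d r : Bool) (st : Nat),
    StInv p l d r st →
    pvB_loop (cs ++ ['|']) acc l d r st
      = pvA_loop ((pipeSplit cs).modifyHead (fun x => p ++ x)) acc := by
  intro cs
  induction cs with
  | nil =>
    intro p acc l d r st h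
    have hfin := finish_eq p l d r st (fun a => some a) acc h
    rw [show (pipeSplit []).modifyHead (fun x => p ++ x) = [p] from by simp [pipeSplit]]
    rw [pvA_cons]
    rw [show pvA_loop [] = fun a => some a from funext fun a => rfl]
    rw [← hfin]
    simp only [List.nil_append, pvB_loop, finB, if_true]
  | cons c cs ih =>
    intro p acc l d r st h
    rw [List.cons_append]
    by_cases hpipe : c = '|'
    · subst hpipe
      have hiha : ∀ a, pvB_loop (cs ++ ['|']) a false false false 0
          = pvA_loop (pipeSplit cs) a := by
        intro a
        rw [ih [] a false false false 0 inv_nil]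
        simp [modifyHead_id']
      rw [show pvB_loop ('|' :: (cs ++ ['|'])) acc l d r st
          = (if st = 0 then pvB_loop (cs ++ ['|']) acc false false false 0
             else if st ≠ 3 ∧ d = true then
               pvB_loop (cs ++ ['|']) (acc ++ [finB l r]) false false false 0
             else none) from by simp [pvB_loop, finB]]
      rw [hiha, hiha]
      rw [show (pipeSplit ('|' :: cs)).modifyHead (fun x => p ++ x)
          = p :: pipeSplit cs from by simp [pipeSplit]]
      rw [pvA_cons]
      exact finish_eq p l d r st (fun a => pvA_loop (pipeSplit cs) a) acc h
    · have hsplit : (pipeSplit (c :: cs)).modifyHead (fun x => p ++ x)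
          = (pipeSplit cs).modifyHead (fun x => (p ++ [c]) ++ x) := by
        rw [show pipeSplit (c :: cs) = (pipeSplit cs).modifyHead (fun x => c :: x) from by
          simp [pipeSplit, hpipe]]
        rw [modifyHead_comp]
        have hfun : (fun x => p ++ c :: x) = (fun x => (p ++ [c]) ++ x) := by
          funext x; simp
        rw [hfun]
      rw [hsplit]
      by_cases h3 : st = 3
      · subst h3
        rw [show pvB_loop (c :: (cs ++ ['|'])) acc l d r 3
            = pvB_loop (cs ++ ['|']) acc l d r 3 from by simp [pvB_loop, hpipe]]
        exact ih (p ++ [c]) acc l d r 3 (inv_st3 p l d r c h)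
      · by_cases hws : PySem.Chars.isspace c = true
        · rw [show pvB_loop (c :: (cs ++ ['|'])) acc l d r st
              = pvB_loop (cs ++ ['|']) acc l d r (if st ≠ 0 then 2 else st) from by
            simp [pvB_loop, hpipe, h3, hws]]
          exact ih (p ++ [c]) acc l d r _ (inv_ws p l d r st c h h3 hws)
        · by_cases hdc : c = '-'
          · subst hdc
            by_cases h2 : st = 2
            · subst h2
              rw [show pvB_loop ('-' :: (cs ++ ['|'])) acc l d r 2
                  = pvB_loop (cs ++ ['|']) acc l d r 3 from by
                simp [pvB_loop, hws]]
              exact ih (p ++ ['-']) acc l d r 3 (inv_dash2 p l d r h)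
            · rw [show pvB_loop ('-' :: (cs ++ ['|'])) acc l d r st
                  = pvB_loop (cs ++ ['|']) acc l true r 1 from by
                simp [pvB_loop, h3, hws, h2]]
              exact ih (p ++ ['-']) acc l true r 1 (inv_dash p l d r st h h3 h2)
          · by_cases hcc : c = ':'
            · subst hcc
              by_cases h0 : st = 0
              · subst h0
                rw [show pvB_loop (':' :: (cs ++ ['|'])) acc l d r 0
                    = pvB_loop (cs ++ ['|']) acc true d r 1 from by
                  simp [pvB_loop, hws]]
                exact ih (p ++ [':']) acc true d r 1 (inv_colon0 p l d r h)
              · by_cases h1d : st = 1 ∧ d = true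
                · obtain ⟨h1, hd⟩ := h1d
                  subst h1
                  rw [show pvB_loop (':' :: (cs ++ ['|'])) acc l d r 1
                      = pvB_loop (cs ++ ['|']) acc l d true 2 from by
                    simp [pvB_loop, hws, hd]]
                  exact ih (p ++ [':']) acc l d true 2 (inv_colon1d p l d r h hd)
                · rw [show pvB_loop (':' :: (cs ++ ['|'])) acc l d r st
                      = pvB_loop (cs ++ ['|']) acc l d r 3 from by
                    simp [pvB_loop, h3, hws, h0, h1d]]
                  exact ih (p ++ [':']) acc l d r 3
                    (inv_colon_bad p l d r st h h3 h0 h1d)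
            · rw [show pvB_loop (c :: (cs ++ ['|'])) acc l d r st
                  = pvB_loop (cs ++ ['|']) acc l d r 3 from by
                simp [pvB_loop, hpipe, h3, hws, hdc, hcc]]
              exact ih (p ++ [c]) acc l d r 3
                (inv_other p l d r st c h h3 (by simpa using hws) hdc hcc)

-- the instance of core actually used at the top
lemma core0 (cs : List Char) (acc : List (Option String)) :
    pvB_loop (cs ++ ['|']) acc false false false 0 = pvA_loop (pipeSplit cs) acc := by
  rw [core cs [] acc false false false 0 inv_nil]
  simp [modifyHead_id']

lemma chain_strip (ls : List Char) (acc : List (Option String)) :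
    pvB_loop (ls ++ ['|']) acc false false false 0
      = pvB_loop (PySem.Chars.strip ls ++ ['|']) acc false false false 0 := by
  obtain ⟨a, b, ha, hb, hdec⟩ := strip_decomp ls
  conv_lhs => rw [hdec]
  rw [List.append_assoc, List.append_assoc]
  rw [pvB_leadws a ha _ acc]
  exact pvB_ctx (b ++ ['|']) ['|'] (pvB_wspipe b hb) (PySem.Chars.strip ls) acc false false false 0

lemma chain_lead (t : List Char) (acc : List (Option String)) :
    pvB_loop (('|' :: t) ++ ['|']) acc false false false 0
      = pvB_loop (t ++ ['|']) acc false false false 0 := by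
  simp [pvB_loop]

lemma chain_tail (y : List Char) (acc : List (Option String)) :
    pvB_loop ((y ++ ['|']) ++ ['|']) acc false false false 0
      = pvB_loop (y ++ ['|']) acc false false false 0 := by
  rw [List.append_assoc]
  exact pvB_ctx (['|'] ++ ['|']) ['|'] pvB_tailpipe y acc false false false 0

-- ===== VERDICT (by name: the statement is the Claim_ definition above) =====
theorem parse_table_delimiter_py_spec : Claim_equal_parse_table_delimiter_py := by
  intro line expected_cols _
  unfold Spec_parse_table_delimiter_py
  simp only [parse_table_delimiter_py, parse_table_delimiter_py_alt]
  set ls := line.toList with hls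
  set l0 := PySem.Chars.strip ls with hl0
  set l1 := (if PySem.Chars.startswith l0 ['|'] then PySem.Chars.slice l0 (some 1) none else l0)
    with hl1
  set l2 := (if PySem.Chars.endswith l1 ['|'] then PySem.Chars.slice l1 none (some (-1)) else l1)
    with hl2
  rw [splitOn_pipe]
  rw [if_neg (by simpa [List.isEmpty_iff] using pipeSplit_ne_nil l2)]
  rw [← core0 l2 []]
  have h21 : pvB_loop (l2 ++ ['|']) [] false false false 0
      = pvB_loop (l1 ++ ['|']) [] false false false 0 := by
    rw [hl2]
    by_cases he : PySem.Chars.endswith l1 ['|'] = true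
    · obtain ⟨y, hy⟩ := (PySem.Chars.endswith_iff _ _).mp he
      rw [if_pos he, slice_dropLast, ← hy, List.dropLast_concat]
      exact (chain_tail y []).symm
    · rw [if_neg he]
  have h10 : pvB_loop (l1 ++ ['|']) [] false false false 0
      = pvB_loop (l0 ++ ['|']) [] false false false 0 := by
    rw [hl1]
    by_cases hs : PySem.Chars.startswith l0 ['|'] = true
    · obtain ⟨t, ht⟩ : ∃ t, l0 = '|' :: t := by
        obtain ⟨m, hm⟩ := (PySem.Chars.startswith_iff _ _).mp hs
        exact ⟨m, hm.symm⟩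
      rw [if_pos hs, slice_drop_one, ht]
      simpa using (chain_lead t []).symm
    · rw [if_neg hs]
  have h0s : pvB_loop (l0 ++ ['|']) [] false false false 0
      = pvB_loop (ls ++ ['|']) [] false false false 0 := by
    rw [hl0]
    exact (chain_strip ls []).symm
  rw [h21, h10, h0s]
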